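-- pv_equiv track=rewrite | github.com/netra-systems/zen | app/tests/e2e/concurrent_load_helpers.py | analyze_pool_exhaustion_results
-- ===== SOURCE A (Python) =====
-- from typing import List, Dict, Any
--
-- def analyze_pool_exhaustion_results(connections: List[int]) -> Dict[str, bool]:
--     """Analyze resource pool exhaustion test results."""
--     connection_errors = sum(1 for c in connections if c == 503)
--     successful = [c for c in connections if c == 200]
--
--     results = {
--         'pool_exhaustion_handled': False,
--         'queue_mechanism_works': False,
--         'graceful_degradation': False
--     }
--
--     if 0 < connection_errors < len(connections):
--         results['pool_exhaustion_handled'] = True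
--
--     if len(successful) > len(connections) // 2:
--         results['queue_mechanism_works'] = True
--
--     if 200 in connections and 503 in connections:
--         results['graceful_degradation'] = True
--
--     return results
-- ===== SOURCE B (Python) =====
-- from typing import List, Dict
--
-- def _bisect_left(a: List[int], x: int) -> int:
--     lo, hi = 0, len(a)
--     while lo < hi:
--         mid = (lo + hi) // 2
--         if a[mid] < x:
--             lo = mid + 1
--         else:
--             hi = mid
--     return lo
--
-- def _bisect_right(a: List[int], x: int) -> int:
--     lo, hi = 0, len(a)
--     while lo < hi:
--         mid = (lo + hi) // 2
--         if x < a[mid]: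
--             hi = mid
--         else:
--             lo = mid + 1
--     return lo
--
-- def analyze_pool_exhaustion_results(connections: List[int]) -> Dict[str, bool]:
--     """Analyze resource pool exhaustion test results (sort + binary search)."""
--     s = sorted(connections)
--     n = len(s)
--     count_200 = _bisect_right(s, 200) - _bisect_left(s, 200)
--     count_503 = _bisect_right(s, 503) - _bisect_left(s, 503)
--     return {
--         'pool_exhaustion_handled': 0 < count_503 < n,
--         'queue_mechanism_works': count_200 > n // 2,
--         'graceful_degradation': count_200 > 0 and count_503 > 0,
--     }
-- ===== Notes on version B (the rewrite author's own statement) =====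
-- stated objective: alternative
-- what changed: Instead of A's four linear traversals (sum of 503s, filter of 200s, two membership scans) on the raw list, B sorts the list once and obtains each status count as the difference of two hand-written binary-search boundaries (bisect_right - bisect_left), deriving all three flags from those counts.
import Mathlib
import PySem

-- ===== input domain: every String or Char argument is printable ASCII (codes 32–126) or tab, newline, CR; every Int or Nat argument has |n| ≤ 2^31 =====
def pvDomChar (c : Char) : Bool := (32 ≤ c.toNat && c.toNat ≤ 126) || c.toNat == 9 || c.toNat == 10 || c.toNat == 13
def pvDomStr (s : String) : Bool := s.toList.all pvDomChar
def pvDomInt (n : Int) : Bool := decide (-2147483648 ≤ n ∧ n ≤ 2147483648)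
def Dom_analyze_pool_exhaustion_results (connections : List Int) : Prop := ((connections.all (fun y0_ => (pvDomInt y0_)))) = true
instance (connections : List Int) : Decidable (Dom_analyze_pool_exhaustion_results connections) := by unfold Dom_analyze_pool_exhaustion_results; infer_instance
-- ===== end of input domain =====

-- B replaces A's four linear traversals with one sort and binary-searched
-- count boundaries (bisect_right - bisect_left), deriving the flags from those counts.

-- ===== PORT A =====
def analyze_pool_exhaustion_results (connections : List Int) : List (String × Bool) :=
  let connection_errors : Int :=
    connections.foldl (fun acc c => if c = 503 then acc + 1 else acc) 0
  let successful : List Int := connections.filter (fun c => c = 200)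
  let results : PySem.Dict String Bool := PySem.Dict.ofList
    [("pool_exhaustion_handled", false),
     ("queue_mechanism_works", false),
     ("graceful_degradation", false)]
  let results :=
    if 0 < connection_errors ∧ connection_errors < (connections.length : Int)
    then results.insert "pool_exhaustion_handled" true else results
  let results :=
    if (successful.length : Int) > PySem.Int.floordiv (connections.length : Int) 2
    then results.insert "queue_mechanism_works" true else results
  let results :=
    if connections.contains 200 ∧ connections.contains 503
    then results.insert "graceful_degradation" true else results
  results.items

-- ===== PORT B =====
-- Source B's hand-written _bisect_left/_bisect_right are exactly the standard
-- while-loop binary searches, which is what PySem.List.bisectLeft/bisectRight are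
-- (fuel = len, mid = (lo+hi)/2, same branch tests), so they are used directly.
def analyze_pool_exhaustion_results_alt (connections : List Int) : List (String × Bool) :=
  let s : List Int := PySem.List.sorted connections (fun x => x) false
  let n : Int := s.length
  let count_200 : Int := (PySem.List.bisectRight s 200 : Int) - (PySem.List.bisectLeft s 200 : Int)
  let count_503 : Int := (PySem.List.bisectRight s 503 : Int) - (PySem.List.bisectLeft s 503 : Int)
  [("pool_exhaustion_handled", decide (0 < count_503 ∧ count_503 < n)),
   ("queue_mechanism_works", decide (count_200 > PySem.Int.floordiv n 2)),
   ("graceful_degradation", decide (count_200 > 0 ∧ count_503 > 0))]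

-- ===== PRECONDITION & SPEC =====
def Spec_analyze_pool_exhaustion_results (connections : List Int) (out : List (String × Bool)) : Prop := out = analyze_pool_exhaustion_results_alt connections
instance (connections : List Int) (out : List (String × Bool)) : Decidable (Spec_analyze_pool_exhaustion_results connections out) := by unfold Spec_analyze_pool_exhaustion_results; infer_instance

-- ===== CLAIM =====
def Claim_equal_analyze_pool_exhaustion_results : Prop := ∀ (connections : List Int), Dom_analyze_pool_exhaustion_results connections → Spec_analyze_pool_exhaustion_results connections (analyze_pool_exhaustion_results connections)

-- ===== LEMMAS AND PROOFS =====

theorem fold503 (l : List Int) : l.foldl (fun acc c => if c = 503 then acc + 1 else acc) 0 = (l.countP (· = 503) : Int) := by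
  have := PySem.List.foldl_count_if (fun c : Int => decide (c = 503)) l 0
  simpa using this

-- a list whose elements fail P before index p, satisfy it on [p,q) and fail it from q on
-- has exactly q - p elements satisfying P
theorem countP_interval (P : Int → Bool) (s : List Int) (p q : Nat) (hpq : p ≤ q) (hq : q ≤ s.length)
    (h1 : ∀ (j : Nat) (hj : j < s.length), j < p → P s[j] = false)
    (h2 : ∀ (j : Nat) (hj : j < s.length), p ≤ j → j < q → P s[j] = true)
    (h3 : ∀ (j : Nat) (hj : j < s.length), q ≤ j → P s[j] = false) :
    s.countP P = q - p := by
  have hsplit : s = s.take p ++ (s.drop p).take (q - p) ++ (s.drop p).drop (q - p) := by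
    rw [List.append_assoc, List.take_append_drop, List.take_append_drop]
  have hp : p ≤ s.length := le_trans hpq hq
  have c1 : (s.take p).countP P = 0 := by
    rw [List.countP_eq_zero]
    intro a ha
    obtain ⟨i, hi, rfl⟩ := List.mem_iff_getElem.mp ha
    have hip : i < p := lt_of_lt_of_le hi (by simp [List.length_take])
    have his : i < s.length := lt_of_lt_of_le hip hp
    rw [List.getElem_take]
    simp [h1 i his hip]
  have c2 : ((s.drop p).take (q - p)).countP P = q - p := by
    have hlen : ((s.drop p).take (q - p)).length = q - p := by
      simp [List.length_take, List.length_drop]; omega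
    have hall : ∀ a ∈ (s.drop p).take (q - p), P a = true := by
      intro a ha
      obtain ⟨i, hi, rfl⟩ := List.mem_iff_getElem.mp ha
      rw [hlen] at hi
      have hips : p + i < s.length := by omega
      rw [List.getElem_take, List.getElem_drop]
      exact h2 (p + i) hips (by omega) (by omega)
    rw [List.countP_eq_length.mpr hall, hlen]
  have c3 : ((s.drop p).drop (q - p)).countP P = 0 := by
    rw [List.drop_drop, List.countP_eq_zero]
    intro a ha
    obtain ⟨i, hi, rfl⟩ := List.mem_iff_getElem.mp ha
    rw [List.length_drop] at hi
    have his : p + (q - p) + i < s.length := by omega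
    rw [List.getElem_drop]
    simp [h3 (p + (q - p) + i) his (by omega)]
  calc s.countP P = (s.take p ++ (s.drop p).take (q - p) ++ (s.drop p).drop (q - p)).countP P := by
        rw [← hsplit]
    _ = q - p := by rw [List.countP_append, List.countP_append, c1, c2, c3]; omega

-- on the sorted copy, bisect_right - bisect_left = the number of occurrences of v
theorem bisect_count (l : List Int) (v : Int) :
    (PySem.List.bisectRight (PySem.List.sorted l (fun x => x) false) v : Int) -
      (PySem.List.bisectLeft (PySem.List.sorted l (fun x => x) false) v : Int)
    = (l.countP (fun c => decide (c = v)) : Int) := by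
  set s := PySem.List.sorted l (fun x => x) false with hs
  have hsort : s.Pairwise (fun a b => a ≤ b) := PySem.List.sorted_pairwise l _
  obtain ⟨hpLen, hpBelow, hpAbove⟩ := PySem.List.bisectLeft_spec s v hsort
  obtain ⟨hqLen, hqBelow, hqAbove⟩ := PySem.List.bisectRight_spec s v hsort
  set p := PySem.List.bisectLeft s v
  set q := PySem.List.bisectRight s v
  have hpq : p ≤ q := by
    by_contra h
    have h2' : q < p := Nat.lt_of_not_le fun hle => h hle
    have hqs : q < s.length := lt_of_lt_of_le h2' hpLen
    have h1 := hpBelow q hqs h2'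
    have h2 := hqAbove q hqs (le_refl q)
    omega
  have hcount : s.countP (fun c => decide (c = v)) = q - p := by
    apply countP_interval _ _ _ _ hpq hqLen
    · intro j hj hjp
      have := hpBelow j hj hjp
      simp; omega
    · intro j hj hjp hjq
      have h1 := hpAbove j hj hjp
      have h2 := hqBelow j hj hjq
      simp; omega
    · intro j hj hjq
      have := hqAbove j hj hjq
      simp; omega
  have hperm : s.countP (fun c => decide (c = v)) = l.countP (fun c => decide (c = v)) :=
    (PySem.List.sorted_perm l (fun x => x) false).countP_eq _
  rw [← hperm, hcount]
  omega

theorem mem_iff_count (l : List Int) (v : Int) : v ∈ l ↔ (0:Int) < (l.countP (· = v) : Int) := by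
  rw [Int.natCast_pos, List.countP_pos_iff]
  constructor
  · intro h; exact ⟨v, h, by simp⟩
  · rintro ⟨x, hx, hxv⟩; simp at hxv; rwa [hxv] at hx

theorem ab_eq (connections : List Int) : Spec_analyze_pool_exhaustion_results connections (analyze_pool_exhaustion_results connections) := by
  simp only [Spec_analyze_pool_exhaustion_results, analyze_pool_exhaustion_results,
    analyze_pool_exhaustion_results_alt, fold503, bisect_count, PySem.List.length_sorted,
    List.countP_eq_length_filter]
  have hCc : ((0:Int) < ((connections.filter (fun c => decide (c = 200))).length : Int) ∧ (0:Int) < ((connections.filter (fun c => decide (c = 503))).length : Int)) ↔ (connections.contains 200 = true ∧ connections.contains 503 = true) := by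
    simp only [List.contains_iff_mem, mem_iff_count, List.countP_eq_length_filter]
  by_cases hA : (0:Int) < ((connections.filter (fun c => decide (c = 503))).length : Int) ∧ ((connections.filter (fun c => decide (c = 503))).length : Int) < (connections.length : Int)
  · by_cases hB : ((connections.filter (fun c => decide (c = 200))).length : Int) > PySem.Int.floordiv (connections.length : Int) 2
    · by_cases hC : (0:Int) < ((connections.filter (fun c => decide (c = 200))).length : Int) ∧ (0:Int) < ((connections.filter (fun c => decide (c = 503))).length : Int)
      · rw [if_pos hA, if_pos hB, if_pos (hCc.mp hC),
           decide_eq_true hA, decide_eq_true hB, decide_eq_true hC]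
        rfl
      · rw [if_pos hA, if_pos hB, if_neg (fun h => hC (hCc.mpr h)),
           decide_eq_true hA, decide_eq_true hB, decide_eq_false hC]
        rfl
    · by_cases hC : (0:Int) < ((connections.filter (fun c => decide (c = 200))).length : Int) ∧ (0:Int) < ((connections.filter (fun c => decide (c = 503))).length : Int)
      · rw [if_pos hA, if_neg hB, if_pos (hCc.mp hC),
           decide_eq_true hA, decide_eq_false hB, decide_eq_true hC]
        rfl
      · rw [if_pos hA, if_neg hB, if_neg (fun h => hC (hCc.mpr h)),
           decide_eq_true hA, decide_eq_false hB, decide_eq_false hC]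
        rfl
  · by_cases hB : ((connections.filter (fun c => decide (c = 200))).length : Int) > PySem.Int.floordiv (connections.length : Int) 2
    · by_cases hC : (0:Int) < ((connections.filter (fun c => decide (c = 200))).length : Int) ∧ (0:Int) < ((connections.filter (fun c => decide (c = 503))).length : Int)
      · rw [if_neg hA, if_pos hB, if_pos (hCc.mp hC),
           decide_eq_false hA, decide_eq_true hB, decide_eq_true hC]
        rfl
      · rw [if_neg hA, if_pos hB, if_neg (fun h => hC (hCc.mpr h)),
           decide_eq_false hA, decide_eq_true hB, decide_eq_false hC]
        rfl
    · by_cases hC : (0:Int) < ((connections.filter (fun c => decide (c = 200))).length : Int) ∧ (0:Int) < ((connections.filter (fun c => decide (c = 503))).length : Int)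
      · rw [if_neg hA, if_neg hB, if_pos (hCc.mp hC),
           decide_eq_false hA, decide_eq_false hB, decide_eq_true hC]
        rfl
      · rw [if_neg hA, if_neg hB, if_neg (fun h => hC (hCc.mpr h)),
           decide_eq_false hA, decide_eq_false hB, decide_eq_false hC]
        rfl

-- ===== VERDICT =====
theorem analyze_pool_exhaustion_results_spec : Claim_equal_analyze_pool_exhaustion_results :=
  fun connections _ => ab_eq connections
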